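-- pv_equiv track=rewrite | github.com/TragicMayhem/advent_of_code | aoc_2025/aoc_2025_d01/aoc2025d01.py | part1
-- ===== SOURCE A (Python) =====
-- from typing import Callable, List, Union
--
-- def part1(data: List[Union[str, list]]):
--     """Solve part 1"""
--     lowhigh = (0, 99)
--     pos = 50
--
--     zero_count = 0
--
--     for dir_char, turns in data:
--
--         direction = 1 if dir_char == "R" else -1
--
--         next_pos = (pos + direction * turns) % 100
--
--         pos = next_pos
--
--         if pos == 0:
--             zero_count += 1
--
--     return zero_count
-- ===== SOURCE B (Python) =====
-- def _solve(deltas, start):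
--     """Divide and conquer: return (sum(deltas), number of nonempty prefixes p of deltas
--     with (start + sum(p)) % 100 == 0). Halves combine because the right half's prefixes
--     are just offset by the left half's total."""
--     n = len(deltas)
--     if n == 0:
--         return (0, 0)
--     if n == 1:
--         d = deltas[0]
--         return (d, 1 if (start + d) % 100 == 0 else 0)
--     mid = n // 2
--     tl, cl = _solve(deltas[:mid], start)
--     tr, cr = _solve(deltas[mid:], start + tl)
--     return (tl + tr, cl + cr)
--
--
-- def part1(data):
--     """Solve part 1: map moves to signed deltas, then count zero hits by
--     divide-and-conquer over the delta list, propagating the offset."""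
--     deltas = [turns if dir_char == "R" else -turns for dir_char, turns in data]
--     return _solve(deltas, 50)[1]
-- ===== Notes on version B (the rewrite author's own statement) =====
-- stated objective: alternative
-- what changed: Replaces A's single stateful left-to-right loop (position reduced mod 100 at each step, zeros counted inline) by a divide-and-conquer recursion: the delta list is split in half, each half is solved recursively with the left half's total propagated as the right half's starting offset, and the halves' zero counts are summed.
import Mathlib
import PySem

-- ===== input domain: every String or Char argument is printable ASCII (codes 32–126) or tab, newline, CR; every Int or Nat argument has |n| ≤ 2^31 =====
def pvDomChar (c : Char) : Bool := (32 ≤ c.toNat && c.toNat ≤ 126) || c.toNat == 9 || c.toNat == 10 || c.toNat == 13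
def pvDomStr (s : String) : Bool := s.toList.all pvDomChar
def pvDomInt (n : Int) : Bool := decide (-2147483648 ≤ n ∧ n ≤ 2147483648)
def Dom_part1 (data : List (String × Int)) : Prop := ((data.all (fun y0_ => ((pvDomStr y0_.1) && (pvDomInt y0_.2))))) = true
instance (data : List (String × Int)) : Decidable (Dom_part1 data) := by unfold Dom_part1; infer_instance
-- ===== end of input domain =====

-- B replaces A's single stateful mod-100 loop by an offset-propagating divide-and-conquer
-- over the signed-delta list (alternative decomposition); return values proved equal on all inputs.

-- ===== PORT A =====
def part1 (data : List (String × Int)) : Int :=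
  (data.foldl (fun (st : Int × Int) p =>
      let direction : Int := if p.1 == "R" then 1 else -1
      let next_pos := PySem.Int.mod (st.1 + direction * p.2) 100
      (next_pos, if next_pos == 0 then st.2 + 1 else st.2))
    (50, 0)).2

-- ===== PORT B =====
-- _solve: divide and conquer; deltas[:mid]/deltas[mid:] with 0 ≤ mid ≤ len are exactly
-- take/drop, and n // 2 on the nonnegative length is exactly Nat division.
def solveB : List Int → Int → Int × Int
  | [], _ => (0, 0)
  | [d], start => (d, if PySem.Int.mod (start + d) 100 == 0 then 1 else 0)
  | d1 :: d2 :: rest, start =>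
    let deltas := d1 :: d2 :: rest
    let mid := deltas.length / 2
    let l := solveB (deltas.take mid) start
    let r := solveB (deltas.drop mid) (start + l.1)
    (l.1 + r.1, l.2 + r.2)
termination_by ds _ => ds.length
decreasing_by
  · simp [List.length_take]; omega
  · simp [List.length_drop]; omega

def part1_alt (data : List (String × Int)) : Int :=
  let deltas := data.map (fun p => if p.1 == "R" then p.2 else -p.2)
  (solveB deltas 50).2

-- ===== PRECONDITION & SPEC =====
def Spec_part1 (data : List (String × Int)) (out : Int) : Prop := out = part1_alt data
instance (data : List (String × Int)) (out : Int) : Decidable (Spec_part1 data out) := by unfold Spec_part1; infer_instance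

-- ===== CLAIM (what is proved, stated in full; the proofs are below) =====
def Claim_equal_part1 : Prop := ∀ (data : List (String × Int)), Dom_part1 data → Spec_part1 data (part1 data)

-- ===== LEMMAS AND PROOFS =====

/-- Linear reference count: zeros hit by the running sum seeded at `s`. -/
def countZ (s : Int) : List Int → Int
  | [] => 0
  | d :: ds => (if PySem.Int.mod (s + d) 100 == 0 then 1 else 0) + countZ (s + d) ds

theorem countZ_append (l r : List Int) (s : Int) :
    countZ s (l ++ r) = countZ s l + countZ (s + l.sum) r := by
  induction l generalizing s with
  | nil => simp [countZ]
  | cons d ds ih => simp [countZ, ih, add_assoc]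

theorem solveB_eq (ds : List Int) (s : Int) : solveB ds s = (ds.sum, countZ s ds) := by
  induction hn : ds.length using Nat.strong_induction_on generalizing ds s with
  | _ n ih =>
    match ds, hn with
    | [], hn => rw [solveB]; simp [countZ]
    | [d], hn => rw [solveB]; simp [countZ]
    | d1 :: d2 :: rest, hn =>
      rw [solveB]
      rw [ih ((d1 :: d2 :: rest).drop ((d1 :: d2 :: rest).length / 2)).length
            (by subst hn; simp; omega) _ _ rfl,
          ih ((d1 :: d2 :: rest).take ((d1 :: d2 :: rest).length / 2)).length
            (by subst hn; simp; omega) _ _ rfl]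
      have key := countZ_append ((d1 :: d2 :: rest).take ((d1 :: d2 :: rest).length / 2))
        ((d1 :: d2 :: rest).drop ((d1 :: d2 :: rest).length / 2)) s
      rw [List.take_append_drop] at key
      have hs : ((d1 :: d2 :: rest).take ((d1 :: d2 :: rest).length / 2)).sum
          + ((d1 :: d2 :: rest).drop ((d1 :: d2 :: rest).length / 2)).sum
          = (d1 :: d2 :: rest).sum := by
        rw [← List.sum_append, List.take_append_drop]
      exact Prod.ext hs key.symm

theorem main_inv (data : List (String × Int)) (s cnt : Int) :
    (data.foldl (fun (st : Int × Int) p =>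
        let direction : Int := if p.1 == "R" then 1 else -1
        let next_pos := PySem.Int.mod (st.1 + direction * p.2) 100
        (next_pos, if next_pos == 0 then st.2 + 1 else st.2))
      (PySem.Int.mod s 100, cnt)).2
    = cnt + countZ s (data.map (fun p => if p.1 == "R" then p.2 else -p.2)) := by
  induction data generalizing s cnt with
  | nil => simp [countZ]
  | cons p rest ih =>
    have hd : (if p.1 == "R" then (1 : Int) else -1) * p.2
        = (if p.1 == "R" then p.2 else -p.2) := by
      by_cases h : p.1 == "R" <;> simp [h]
    set d : Int := if p.1 == "R" then p.2 else -p.2 with hdd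
    have hmod : PySem.Int.mod (PySem.Int.mod s 100 + d) 100 = PySem.Int.mod (s + d) 100 := by
      simp only [PySem.Int.mod_eq_emod_of_pos (show (0:Int) < 100 by omega)]
      omega
    simp only [List.foldl, List.map, countZ]
    rw [hd, ← hdd, hmod, ih (s + d)]
    by_cases hz : PySem.Int.mod (s + d) 100 = 0 <;> simp only [hz, if_true, if_false, beq_iff_eq, beq_self_eq_true] <;> omega

-- ===== VERDICT (by name: the statement is the Claim_ definition above) =====
theorem part1_spec : Claim_equal_part1 := by
  intro data _
  unfold Spec_part1 part1 part1_alt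
  have h50 : (50 : Int) = PySem.Int.mod 50 100 := by decide
  dsimp only
  rw [solveB_eq]
  rw [h50, main_inv]
  simp
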